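-- pv_equiv track=rewrite | github.com/King-Navi/script_recall_precision | src/bib2table.py | split_bibtex_entries
-- ===== SOURCE A (Python) =====
-- from typing import Dict, List, Tuple
--
-- def split_bibtex_entries(text: str) -> List[str]:
--     entries, i, n = [], 0, len(text)
--     while i < n:
--         at = text.find('@', i)
--         if at == -1: break
--         br_open = text.find('{', at)
--         if br_open == -1: break
--         depth, j = 1, br_open + 1
--         while j < n and depth > 0:
--             ch = text[j]
--             if ch == '{': depth += 1
--             elif ch == '}': depth -= 1
--             j += 1
--         if depth == 0:
--             entries.append(text[at:j]); i = j
--         else: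
--             entries.append(text[at:]); break
--     return entries
-- ===== SOURCE B (Python) =====
-- def split_bibtex_entries(text):
--     # single flat character loop with an explicit 3-state machine and a growing buffer
--     entries = []
--     state = 0  # 0 = seeking '@', 1 = seeking first '{', 2 = inside entry
--     buf = []
--     depth = 0
--     for ch in text:
--         if state == 0:
--             if ch == '@':
--                 buf = [ch]
--                 state = 1
--         elif state == 1:
--             buf.append(ch)
--             if ch == '{':
--                 depth = 1
--                 state = 2
--         else:
--             buf.append(ch)
--             if ch == '{':
--                 depth += 1
--             elif ch == '}':
--                 depth -= 1
--                 if depth == 0: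
--                     entries.append(''.join(buf))
--                     buf = []
--                     state = 0
--     if state == 2:
--         entries.append(''.join(buf))
--     return entries
-- ===== Notes on version B (the rewrite author's own statement) =====
-- stated objective: alternative
-- what changed: Replaced A's find-driven index loop (find the next entry marker, find its opening brace, rescan to the matching close) by a single flat pass over the characters with an explicit three-state machine that builds each entry in a growing buffer instead of slicing.
import Mathlib
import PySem

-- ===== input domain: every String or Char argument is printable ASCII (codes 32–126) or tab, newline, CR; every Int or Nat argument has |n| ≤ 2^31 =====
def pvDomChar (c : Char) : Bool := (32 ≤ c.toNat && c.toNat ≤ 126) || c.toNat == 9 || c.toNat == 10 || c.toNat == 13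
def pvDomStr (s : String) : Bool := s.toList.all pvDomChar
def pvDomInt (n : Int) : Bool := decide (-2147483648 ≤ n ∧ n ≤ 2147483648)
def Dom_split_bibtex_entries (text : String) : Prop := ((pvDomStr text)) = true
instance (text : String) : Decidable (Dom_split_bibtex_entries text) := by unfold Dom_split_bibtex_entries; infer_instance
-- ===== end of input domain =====

-- B replaces A's find-driven index loop by a single flat pass with a 3-state machine and an
-- entry buffer; same O(n) cost, a different decomposition (objective: alternative).

-- ===== PORT A =====
-- inner 'while j < n and depth > 0' loop of A; returns the final (depth, j).
-- fuel-guarded structural recursion: fuel ≥ cs.length - j makes the guard unreachable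
def pvAInner (fuel : Nat) (cs : List Char) (depth : Int) (j : Nat) : Int × Nat :=
  match fuel with
  | 0 => (depth, j)
  | fuel + 1 =>
    if h : j < cs.length ∧ depth > 0 then
      let ch := cs[j]'h.1
      let depth' := if ch = '{' then depth + 1 else if ch = '}' then depth - 1 else depth
      pvAInner fuel cs depth' (j + 1)
    else (depth, j)

-- outer 'while i < n' loop of A (fuel ≥ cs.length - i + 1 makes the guard unreachable)
def pvAOuter (fuel : Nat) (cs : List Char) (i : Nat) : List String :=
  match fuel with
  | 0 => []
  | fuel + 1 =>
    if i < cs.length then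
      let atI := PySem.Chars.findFrom cs ['@'] (i : Int) none
      if atI = -1 then [] else
      let brI := PySem.Chars.findFrom cs ['{'] ((atI.toNat : Nat) : Int) none
      if brI = -1 then [] else
      if (pvAInner cs.length cs 1 (brI.toNat + 1)).1 = 0 then
        String.ofList (PySem.List.slice cs (some (atI.toNat : Int)) (some ((pvAInner cs.length cs 1 (brI.toNat + 1)).2 : Int)))
          :: pvAOuter fuel cs (pvAInner cs.length cs 1 (brI.toNat + 1)).2
      else [String.ofList (PySem.List.slice cs (some (atI.toNat : Int)) none)]
    else []

def split_bibtex_entries (text : String) : List String :=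
  pvAOuter (text.toList.length + 1) text.toList 0

-- ===== PORT B =====
-- B's flat loop: state 0 = seeking '@', 1 = seeking the first '{', 2 = inside an entry
def pvBLoop (cs : List Char) (state : Nat) (buf : List Char) (depth : Int)
    (entries : List String) : List String :=
  match cs with
  | [] => if state = 2 then entries ++ [String.ofList buf] else entries
  | ch :: rest =>
    if state = 0 then
      if ch = '@' then pvBLoop rest 1 [ch] depth entries
      else pvBLoop rest 0 buf depth entries
    else if state = 1 then
      let buf' := buf ++ [ch]
      if ch = '{' then pvBLoop rest 2 buf' 1 entries
      else pvBLoop rest 1 buf' depth entries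
    else
      let buf' := buf ++ [ch]
      if ch = '{' then pvBLoop rest 2 buf' (depth + 1) entries
      else if ch = '}' then
        if depth - 1 = 0 then pvBLoop rest 0 [] (depth - 1) (entries ++ [String.ofList buf'])
        else pvBLoop rest 2 buf' (depth - 1) entries
      else pvBLoop rest 2 buf' depth entries

def split_bibtex_entries_alt (text : String) : List String := pvBLoop text.toList 0 [] 0 []

-- ===== PRECONDITION & SPEC =====
def Spec_split_bibtex_entries (text : String) (out : List String) : Prop := out = split_bibtex_entries_alt text
instance (text : String) (out : List String) : Decidable (Spec_split_bibtex_entries text out) := by unfold Spec_split_bibtex_entries; infer_instance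

-- ===== CLAIM (what is proved, stated in full; the proofs are below) =====
def Claim_equal_split_bibtex_entries : Prop := ∀ (text : String), Dom_split_bibtex_entries text → Spec_split_bibtex_entries text (split_bibtex_entries text)

-- ===== LEMMAS AND PROOFS =====

-- proof-side description of the brace-depth scan shared by A's inner loop and B's state 2:
-- pvScan u d = (final depth, number of characters consumed until the depth hits 0, or all of u)
def pvScan (u : List Char) (d : Int) : Int × Nat :=
  match u with
  | [] => (d, 0)
  | c :: r =>
    let d' := if c = '{' then d + 1 else if c = '}' then d - 1 else d
    if d' = 0 then (0, 1)
    else ((pvScan r d').1, (pvScan r d').2 + 1)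

theorem pvScan_le (u : List Char) (d : Int) : (pvScan u d).2 ≤ u.length := by
  induction u generalizing d with
  | nil => simp [pvScan]
  | cons c r ih =>
    simp only [pvScan, List.length_cons]
    set d' := if c = '{' then d + 1 else if c = '}' then d - 1 else d with hd'
    by_cases h0 : d' = 0
    · rw [if_pos h0]; simp
    · rw [if_neg h0]
      have := ih d'
      simp; omega

theorem pvScan_ne_zero (u : List Char) (d : Int) (h : (pvScan u d).1 ≠ 0) :
    (pvScan u d).2 = u.length := by
  induction u generalizing d with
  | nil => simp [pvScan]
  | cons c r ih =>
    simp only [pvScan, List.length_cons] at h ⊢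
    set d' := if c = '{' then d + 1 else if c = '}' then d - 1 else d with hd'
    by_cases h0 : d' = 0
    · rw [if_pos h0] at h; exact absurd rfl h
    · rw [if_neg h0] at h ⊢
      simp at h ⊢
      exact ih d' h

-- A's inner loop computes exactly pvScan of the suffix it scans (given enough fuel)
theorem pvAInner_eq_scan (fuel : Nat) : ∀ (cs : List Char) (j : Nat) (d : Int),
    cs.length - j ≤ fuel → j ≤ cs.length → 0 < d →
    pvAInner fuel cs d j = ((pvScan (cs.drop j) d).1, j + (pvScan (cs.drop j) d).2) := by
  induction fuel with
  | zero =>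
    intro cs j d hf hj hd
    have hjeq : j = cs.length := by omega
    rw [List.drop_of_length_le (by omega)]
    simp [pvAInner, pvScan]
  | succ fuel ih =>
    intro cs j d hf hj hd
    by_cases hjn : j < cs.length
    · have hcond : j < cs.length ∧ d > 0 := ⟨hjn, hd⟩
      show (if h : j < cs.length ∧ d > 0 then _ else _) = _
      rw [dif_pos hcond]
      have hdrop : cs.drop j = cs[j] :: cs.drop (j + 1) := List.drop_eq_getElem_cons hjn
      rw [hdrop]
      show pvAInner fuel cs (if cs[j] = '{' then d + 1 else if cs[j] = '}' then d - 1 else d) (j + 1) = _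
      set d' := if cs[j] = '{' then d + 1 else if cs[j] = '}' then d - 1 else d with hd'
      simp only [pvScan]
      rw [← hd']
      by_cases h0 : d' = 0
      · rw [if_pos h0, h0]
        cases fuel with
        | zero => rfl
        | succ m => show (if h : _ ∧ (0:Int) > 0 then _ else _) = _; rw [dif_neg (by simp)]
      · rw [if_neg h0]
        have hdpos : 0 < d' := by
          rw [hd'] at h0 ⊢
          split_ifs at h0 ⊢ <;> omega
        rw [ih cs (j + 1) d' (by omega) (by omega) hdpos]
        exact Prod.ext rfl (by simp; omega)
    · have hnc : ¬ (j < cs.length ∧ d > 0) := by omega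
      show (if h : j < cs.length ∧ d > 0 then _ else _) = _
      rw [dif_neg hnc]
      rw [List.drop_of_length_le (by omega)]
      simp [pvScan]

-- B accumulates its entries on the left
theorem pvBLoop_acc (cs : List Char) (st : Nat) (buf : List Char) (d : Int) (e : List String) :
    pvBLoop cs st buf d e = e ++ pvBLoop cs st buf d [] := by
  induction cs generalizing st buf d e with
  | nil =>
    simp only [pvBLoop]
    split_ifs <;> simp
  | cons c r ih =>
    simp only [pvBLoop]
    split_ifs with h1 h2 h3 h4 h5 h6 h7
    · exact ih _ _ _ _
    · exact ih _ _ _ _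
    · exact ih _ _ _ _
    · exact ih _ _ _ _
    · exact ih _ _ _ _
    · rw [ih _ _ _ (e ++ [String.ofList (buf ++ [c])]),
        ih 0 [] (d - 1) ([] ++ [String.ofList (buf ++ [c])])]
      simp
    · exact ih _ _ _ _
    · exact ih _ _ _ _

-- state 0 skips every character that is not '@'
theorem pvBLoop_skip0 (v u : List Char) (hv : '@' ∉ v) (buf : List Char) (d : Int) (e : List String) :
    pvBLoop (v ++ u) 0 buf d e = pvBLoop u 0 buf d e := by
  induction v generalizing e with
  | nil => rfl
  | cons c r ih =>
    simp only [List.mem_cons, not_or] at hv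
    have hc : ¬ c = '@' := fun h => hv.1 h.symm
    simp only [List.cons_append, pvBLoop, if_neg hc]
    exact ih hv.2 e

-- with no '@' left, state 0 produces nothing further
theorem pvBLoop_none0 (v : List Char) (hv : '@' ∉ v) (buf : List Char) (d : Int) (e : List String) :
    pvBLoop v 0 buf d e = e := by
  have := pvBLoop_skip0 v [] hv buf d e
  simpa [pvBLoop] using this

-- state 1 buffers every character up to the first '{'
theorem pvBLoop_skip1 (v u : List Char) (hv : '{' ∉ v) (buf : List Char) (d : Int) (e : List String) :
    pvBLoop (v ++ u) 1 buf d e = pvBLoop u 1 (buf ++ v) d e := by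
  induction v generalizing buf e with
  | nil => simp
  | cons c r ih =>
    simp only [List.mem_cons, not_or] at hv
    have hc : ¬ c = '{' := fun h => hv.1 h.symm
    simp only [List.cons_append, pvBLoop, if_neg (by decide : ¬ (1 : Nat) = 0), if_neg hc]
    rw [ih hv.2]
    simp

-- with no '{' left, state 1 emits nothing
theorem pvBLoop_none1 (v : List Char) (hv : '{' ∉ v) (buf : List Char) (d : Int) (e : List String) :
    pvBLoop v 1 buf d e = e := by
  have := pvBLoop_skip1 v [] hv buf d e
  simpa [pvBLoop] using this

-- B's state 2 follows pvScan: either the entry closes and B returns to state 0, or the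
-- input ends inside the entry and the buffered tail is emitted
theorem pvBLoop_state2 (u : List Char) (buf : List Char) (d : Int) (e : List String) (hd : 0 < d) :
    pvBLoop u 2 buf d e =
      if (pvScan u d).1 = 0 then
        pvBLoop (u.drop (pvScan u d).2) 0 [] 0 (e ++ [String.ofList (buf ++ u.take (pvScan u d).2)])
      else e ++ [String.ofList (buf ++ u)] := by
  induction u generalizing buf d e with
  | nil =>
    have hne : ¬ ((pvScan ([] : List Char) d).1 = 0) := by simp [pvScan]; omega
    rw [if_neg hne]
    simp [pvBLoop]
  | cons c r ih =>
    simp only [pvScan]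
    set d' := if c = '{' then d + 1 else if c = '}' then d - 1 else d with hd'
    by_cases h0 : d' = 0
    · -- the '}' that closes the entry
      have hc : c = '}' := by
        by_contra hcne
        rw [hd'] at h0
        by_cases hcb : c = '{' <;> simp [hcb, hcne] at h0 <;> omega
      have hd1 : d = 1 := by rw [hd', hc] at h0; simp at h0; omega
      rw [if_pos h0]
      simp only [pvBLoop, if_neg (by decide : ¬ (2 : Nat) = 0), if_neg (by decide : ¬ (2 : Nat) = 1),
        if_neg (show ¬ c = '{' by rw [hc]; decide), if_pos hc, hd1]
      rw [if_pos (by decide : (1 : Int) - 1 = 0)]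
      simp
    · rw [if_neg h0]
      have hdpos : 0 < d' := by
        rw [hd'] at h0 ⊢
        split_ifs at h0 ⊢ <;> omega
      have hstep : pvBLoop (c :: r) 2 buf d e = pvBLoop r 2 (buf ++ [c]) d' e := by
        simp only [pvBLoop, if_neg (by decide : ¬ (2 : Nat) = 0), if_neg (by decide : ¬ (2 : Nat) = 1)]
        by_cases hcb : c = '{'
        · rw [if_pos hcb, hd', if_pos hcb]
        · rw [if_neg hcb]
          by_cases hcc : c = '}'
          · rw [if_pos hcc, hd', if_neg hcb, if_pos hcc, if_neg (by rw [hd', if_neg hcb, if_pos hcc] at h0; exact h0)]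
          · rw [if_neg hcc, hd', if_neg hcb, if_neg hcc]
      rw [hstep, ih (buf ++ [c]) d' e hdpos]
      split_ifs with hs
      · simp
      · simp

-- a character of a take-of-drop window would name an index of cs inside the window
theorem pv_not_mem_take (cs : List Char) (c : Char) (k m : Nat)
    (hmin : ∀ t : Nat, k ≤ t → t < m → ¬ [c] <+: cs.drop t) :
    c ∉ (cs.drop k).take (m - k) := by
  intro hmem
  obtain ⟨t, ht, heq⟩ := List.mem_iff_getElem.mp hmem
  have ht1 : t < m - k := by
    have := ht; simp at this; omega
  have htlen : k + t < cs.length := by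
    have := ht; simp at this; omega
  have hget : cs[k + t]'htlen = c := by
    have h1 : ((cs.drop k).take (m - k))[t] = (cs.drop k)[t]'(by simp; omega) := List.getElem_take
    rw [h1] at heq
    rw [List.getElem_drop] at heq
    exact heq
  have hpre : [c] <+: cs.drop (k + t) := by
    rw [List.drop_eq_getElem_cons htlen, hget]
    exact ⟨cs.drop (k + t + 1), rfl⟩
  exact hmin (k + t) (by omega) (by omega) hpre

-- main correspondence: A's outer loop from position i equals B's machine on the suffix
theorem pvMain_aux (fuel : Nat) : ∀ (cs : List Char) (i : Nat), cs.length - i < fuel → i ≤ cs.length →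
    pvAOuter fuel cs i = pvBLoop (cs.drop i) 0 [] 0 [] := by
  induction fuel with
  | zero => intro cs i hk; omega
  | succ fuel ihk =>
    intro cs i hk hi
    by_cases hin : i < cs.length
    · show (if _ : i < cs.length then _ else _) = _
      rw [dif_pos hin]
      by_cases hat : PySem.Chars.findFrom cs ['@'] (i : Int) none = -1
      · rw [if_pos hat]
        have hno : ¬ ['@'] <:+: cs.drop i := (PySem.Chars.findFrom_natCast_eq_neg_one_iff cs ['@'] i hi).mp hat
        have hmem : '@' ∉ cs.drop i := fun hm => hno ((List.singleton_infix_iff _ _).mpr hm)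
        rw [pvBLoop_none0 _ hmem]
      · rw [if_neg hat]
        have hsp := PySem.Chars.findFrom_natCast_spec cs ['@'] i hi hat
        set atI := PySem.Chars.findFrom cs ['@'] (i : Int) none with hatI
        have h1 : (i : Int) ≤ atI := hsp.1
        set a := atI.toNat with haN
        have ha : i ≤ a := by omega
        have hpa : ['@'] <+: cs.drop a := hsp.2.1
        obtain ⟨w0, hw0⟩ := hpa
        have haL : a < cs.length := by
          have := congrArg List.length hw0; simp at this; omega
        have hdropa : cs.drop a = '@' :: cs.drop (a + 1) := by
          have h' : cs.drop (a + 1) = w0 := by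
            rw [← List.drop_drop, ← hw0]; rfl
          rw [h', ← hw0]; rfl
        have hminA : ∀ t : Nat, i ≤ t → t < a → ¬ ['@'] <+: cs.drop t := hsp.2.2
        have hsplitA : cs.drop i = (cs.drop i).take (a - i) ++ cs.drop a := by
          rw [show cs.drop a = (cs.drop i).drop (a - i) by
            rw [List.drop_drop]; congr 1; omega]
          exact (List.take_append_drop _ _).symm
        have hskipA : pvBLoop (cs.drop i) 0 [] 0 [] = pvBLoop (cs.drop a) 0 [] 0 [] := by
          rw [hsplitA]
          exact pvBLoop_skip0 _ _ (pv_not_mem_take cs '@' i a hminA) [] 0 []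
        by_cases hbr : PySem.Chars.findFrom cs ['{'] ((a : Nat) : Int) none = -1
        · rw [if_pos hbr]
          have hno : ¬ ['{'] <:+: cs.drop a := (PySem.Chars.findFrom_natCast_eq_neg_one_iff cs ['{'] a (le_of_lt haL)).mp hbr
          have hmem : '{' ∉ cs.drop a := fun hm => hno ((List.singleton_infix_iff _ _).mpr hm)
          rw [hskipA, hdropa]
          have hmem1 : '{' ∉ cs.drop (a + 1) := by
            rw [hdropa] at hmem; simp at hmem; exact hmem
          symm
          simp only [pvBLoop]
          exact pvBLoop_none1 _ hmem1 ['@'] 0 []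
        · rw [if_neg hbr]
          have hsp2 := PySem.Chars.findFrom_natCast_spec cs ['{'] a (le_of_lt haL) hbr
          set brI := PySem.Chars.findFrom cs ['{'] ((a : Nat) : Int) none with hbrI
          have h2 : ((a : Nat) : Int) ≤ brI := hsp2.1
          set b := brI.toNat with hbN
          have hb : a ≤ b := by omega
          have hpb : ['{'] <+: cs.drop b := hsp2.2.1
          obtain ⟨q0, hq0⟩ := hpb
          have hbL : b < cs.length := by
            have := congrArg List.length hq0; simp at this; omega
          have hdropb : cs.drop b = '{' :: cs.drop (b + 1) := by
            have h' : cs.drop (b + 1) = q0 := by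
              rw [← List.drop_drop, ← hq0]; rfl
            rw [h', ← hq0]; rfl
          have hab : a < b := by
            rcases Nat.lt_or_ge a b with h | h
            · exact h
            · have heq : a = b := by omega
              rw [← heq, hdropa] at hdropb
              exact absurd (List.head_eq_of_cons_eq hdropb) (by decide)
          have hminB1 : ∀ t : Nat, a + 1 ≤ t → t < b → ¬ ['{'] <+: cs.drop t :=
            fun t h1t h2t => hsp2.2.2 t (by omega) h2t
          set mid := (cs.drop (a + 1)).take (b - (a + 1)) with hmid
          have hmemMid : '{' ∉ mid := pv_not_mem_take cs '{' (a + 1) b hminB1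
          have hsplitB : cs.drop (a + 1) = mid ++ cs.drop b := by
            rw [hmid,
              show cs.drop b = (cs.drop (a + 1)).drop (b - (a + 1)) by
                rw [List.drop_drop]; congr 1; omega]
            exact (List.take_append_drop _ _).symm
          -- the suffix from a, fully decomposed
          have hDropEq : cs.drop a = ('@' :: mid ++ ['{']) ++ cs.drop (b + 1) := by
            rw [hdropa, hsplitB, hdropb]; simp
          have hmidlen : ('@' :: mid ++ ['{']).length = b + 1 - a := by
            have hml : mid.length = b - (a + 1) := by
              rw [hmid, List.length_take, List.length_drop]
              omega
            simp [hml]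
            omega
          -- B runs: skip to a, consume '@', buffer mid, consume '{', then scan from b+1
          have hB : pvBLoop (cs.drop i) 0 [] 0 [] = pvBLoop (cs.drop (b + 1)) 2 ('@' :: mid ++ ['{']) 1 [] := by
            rw [hskipA, hdropa]
            show pvBLoop ('@' :: cs.drop (a + 1)) 0 [] 0 [] = _
            simp only [pvBLoop]
            rw [hsplitB, pvBLoop_skip1 mid _ hmemMid ['@'] 0 [], hdropb]
            show pvBLoop ('{' :: cs.drop (b + 1)) 1 ('@' :: mid) 0 [] = _
            simp only [pvBLoop, if_neg (by decide : ¬ (1 : Nat) = 0)]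
            rfl
          have hscan := pvAInner_eq_scan cs.length cs (b + 1) 1 (by omega) (by omega) one_pos
          set s1 := (pvScan (cs.drop (b + 1)) 1).1 with hs1
          set s2 := (pvScan (cs.drop (b + 1)) 1).2 with hs2
          have hs2le : s2 ≤ cs.length - (b + 1) := by
            have := pvScan_le (cs.drop (b + 1)) 1
            simp at this; omega
          rw [hB, pvBLoop_state2 _ _ 1 [] one_pos, hscan, ← hs1, ← hs2]
          by_cases hz : s1 = 0
          · rw [if_pos hz, if_pos hz]
            simp only [List.nil_append]
            rw [List.drop_drop, pvBLoop_acc]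
            have hlt : cs.length - (b + 1 + s2) < fuel := by omega
            have hle' : b + 1 + s2 ≤ cs.length := by omega
            have hrec : pvAOuter fuel cs (b + 1 + s2) = pvBLoop (cs.drop (b + 1 + s2)) 0 [] 0 [] :=
              ihk cs (b + 1 + s2) hlt hle'
            rw [← hrec]
            congr 1
            -- the emitted entry equals A's slice text[a : b+1+s2]
            rw [PySem.List.slice_natCast cs a (b + 1 + s2)]
            congr 1
            rw [show b + 1 + s2 - a = ('@' :: mid ++ ['{']).length + s2 by rw [hmidlen]; omega]
            rw [show cs.drop a = ('@' :: mid ++ ['{']) ++ cs.drop (b + 1) from hDropEq]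
            exact List.take_length_add_append s2
          · rw [if_neg hz, if_neg hz]
            have hs2all : s2 = (cs.drop (b + 1)).length := pvScan_ne_zero _ _ hz
            simp only [List.nil_append]
            congr 1
            rw [PySem.List.slice_from cs (by positivity : (0 : Int) ≤ (a : Int))]
            rw [show ((a : Nat) : Int).toNat = a by omega, hDropEq]
    · show (if _ : i < cs.length then _ else _) = _
      rw [dif_neg hin, List.drop_of_length_le (by omega)]
      rfl

theorem pvMain (cs : List Char) (i : Nat) (hi : i ≤ cs.length) :
    pvAOuter (cs.length + 1) cs i = pvBLoop (cs.drop i) 0 [] 0 [] :=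
  pvMain_aux (cs.length + 1) cs i (by omega) hi

-- ===== VERDICT (by name: the statement is the Claim_ definition above) =====
theorem split_bibtex_entries_spec : Claim_equal_split_bibtex_entries := by
  intro text _
  unfold Spec_split_bibtex_entries split_bibtex_entries split_bibtex_entries_alt
  simpa using pvMain text.toList 0 (Nat.zero_le _)
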